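-- pv_equiv track=rewrite | github.com/karelholub/MMM | meiro-mmm-app/backend/app/services_model_config_suggestions.py | _resolve_kpi_for_conversion
-- ===== SOURCE A (Python) =====
-- from typing import Any, Dict, List, Optional, Sequence
--
-- def _normalize_token(value: Any) -> str:
--     return str(value or "").strip().lower()
--
-- def _resolve_kpi_for_conversion(
--     conversion_name: str,
--     kpi_by_id: Dict[str, Dict[str, Any]],
-- ) -> Optional[str]:
--     needle = _normalize_token(conversion_name)
--     if not needle:
--         return None
--     if needle in kpi_by_id:
--         return needle
--     for kpi_id, item in kpi_by_id.items():
--         event_name = _normalize_token(item.get("event_name"))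
--         label = _normalize_token(item.get("label"))
--         if needle == event_name or needle == label:
--             return kpi_id
--     for kpi_id, item in kpi_by_id.items():
--         event_name = _normalize_token(item.get("event_name"))
--         label = _normalize_token(item.get("label"))
--         if needle in {event_name, label}:
--             return kpi_id
--         if needle and ((event_name and needle in event_name) or (label and needle in label)):
--             return kpi_id
--     return None
-- ===== SOURCE B (Python) =====
-- from typing import Any, Dict, Optional
--
--
-- def _normalize_token(value: Any) -> str:
--     return str(value or "").strip().lower()
--
--
-- def _resolve_kpi_for_conversion(
--     conversion_name: str,
--     kpi_by_id: Dict[str, Dict[str, Any]],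
-- ) -> Optional[str]:
--     needle = _normalize_token(conversion_name)
--     if not needle:
--         return None
--     if needle in kpi_by_id:
--         return needle
--     # one full scan with a two-slot accumulator: first exact hit, first substring hit
--     exact: Optional[str] = None
--     sub: Optional[str] = None
--     for kpi_id, item in kpi_by_id.items():
--         en = _normalize_token(item.get("event_name"))
--         la = _normalize_token(item.get("label"))
--         if exact is None and (needle == en or needle == la):
--             exact = kpi_id
--         if sub is None and (needle in en or needle in la):
--             sub = kpi_id
--     return exact if exact is not None else sub
-- ===== Notes on version B (the rewrite author's own statement) =====
-- stated objective: simpler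
-- what changed: A's staged early-return scans (an exact-match pass, then a second pass redoing normalization with a guarded substring test) are replaced by one full fold over the dict that accumulates the first exact hit and the first substring hit in a two-slot accumulator, returning exact-or-substring afterwards; the redundant non-empty guards disappear since a nonempty needle is never a substring of an empty string.
import Mathlib
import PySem

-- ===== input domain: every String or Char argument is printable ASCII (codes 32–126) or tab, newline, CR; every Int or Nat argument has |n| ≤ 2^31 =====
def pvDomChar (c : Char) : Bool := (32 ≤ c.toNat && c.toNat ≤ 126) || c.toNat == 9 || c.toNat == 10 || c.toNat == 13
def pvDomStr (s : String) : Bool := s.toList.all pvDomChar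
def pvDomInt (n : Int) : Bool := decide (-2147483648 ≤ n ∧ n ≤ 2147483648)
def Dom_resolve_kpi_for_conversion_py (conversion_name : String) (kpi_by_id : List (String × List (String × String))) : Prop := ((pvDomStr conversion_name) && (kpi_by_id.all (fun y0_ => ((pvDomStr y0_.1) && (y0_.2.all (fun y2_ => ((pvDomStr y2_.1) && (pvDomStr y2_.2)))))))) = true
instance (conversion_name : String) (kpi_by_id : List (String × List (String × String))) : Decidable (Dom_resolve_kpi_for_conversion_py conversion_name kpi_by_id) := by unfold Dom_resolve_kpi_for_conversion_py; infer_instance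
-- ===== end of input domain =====

-- B replaces A's staged early-return scans by ONE full fold carrying a two-slot accumulator
-- (first exact hit, first substring hit), returned as exact-or-substring: simpler, one pass, no re-normalization.


-- ===== PORT A =====
-- _normalize_token(value) for a string (or missing → "") argument: str(value or "").strip().lower()
def pvNormTok (s : String) : String := PySem.Str.lower (PySem.Str.strip s)

-- item.get(key) then _normalize_token: missing key → None → ""
def pvGetNorm (item : List (String × String)) (key : String) : String :=
  pvNormTok ((PySem.Dict.mk item).getD key "")

-- first loop of A: exact match on normalized event_name / label
def pvFindExact (needle : String) : List (String × List (String × String)) → Option String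
  | [] => none
  | (kpi_id, item) :: rest =>
    let event_name := pvGetNorm item "event_name"
    let label := pvGetNorm item "label"
    if needle = event_name ∨ needle = label then some kpi_id
    else pvFindExact needle rest

-- second loop of A: exact-in-set check, then guarded substring check
def pvFindSub (needle : String) : List (String × List (String × String)) → Option String
  | [] => none
  | (kpi_id, item) :: rest =>
    let event_name := pvGetNorm item "event_name"
    let label := pvGetNorm item "label"
    if needle = event_name ∨ needle = label then some kpi_id
    else if needle ≠ "" ∧ ((event_name ≠ "" ∧ PySem.Str.isIn needle event_name = true) ∨
                           (label ≠ "" ∧ PySem.Str.isIn needle label = true)) then some kpi_id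
    else pvFindSub needle rest

def resolve_kpi_for_conversion_py (conversion_name : String) (kpi_by_id : List (String × List (String × String))) : Option String :=
  let needle := pvNormTok conversion_name
  if needle = "" then none
  else if kpi_by_id.any (fun p => p.1 == needle) then some needle
  else match pvFindExact needle kpi_by_id with
    | some kpi_id => some kpi_id
    | none => pvFindSub needle kpi_by_id

-- ===== PORT B =====
-- one fold step: fill the exact slot / substring slot if still empty
def pvScanStep (needle : String) (st : Option String × Option String)
    (p : String × List (String × String)) : Option String × Option String :=
  let en := pvGetNorm p.2 "event_name"
  let la := pvGetNorm p.2 "label"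
  ((if st.1 = none ∧ (needle = en ∨ needle = la) then some p.1 else st.1),
   (if st.2 = none ∧ (PySem.Str.isIn needle en = true ∨ PySem.Str.isIn needle la = true)
    then some p.1 else st.2))

def resolve_kpi_for_conversion_py_alt (conversion_name : String) (kpi_by_id : List (String × List (String × String))) : Option String :=
  let needle := pvNormTok conversion_name
  if needle = "" then none
  else if (kpi_by_id.map Prod.fst).contains needle then some needle
  else
    let st := kpi_by_id.foldl (pvScanStep needle) (none, none)
    match st.1 with
    | some e => some e
    | none => st.2

-- ===== PRECONDITION & SPEC =====
def Spec_resolve_kpi_for_conversion_py (conversion_name : String) (kpi_by_id : List (String × List (String × String))) (out : Option String) : Prop := out = resolve_kpi_for_conversion_py_alt conversion_name kpi_by_id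
instance (conversion_name : String) (kpi_by_id : List (String × List (String × String))) (out : Option String) : Decidable (Spec_resolve_kpi_for_conversion_py conversion_name kpi_by_id out) := by unfold Spec_resolve_kpi_for_conversion_py; infer_instance

-- ===== CLAIM =====
def Claim_equal_resolve_kpi_for_conversion_py : Prop := ∀ (conversion_name : String) (kpi_by_id : List (String × List (String × String))), Dom_resolve_kpi_for_conversion_py conversion_name kpi_by_id → Spec_resolve_kpi_for_conversion_py conversion_name kpi_by_id (resolve_kpi_for_conversion_py conversion_name kpi_by_id)

-- ===== LEMMAS AND PROOFS =====

-- unguarded substring find: the value B's second accumulator slot computes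
def pvFindSubU (needle : String) : List (String × List (String × String)) → Option String
  | [] => none
  | (kpi_id, item) :: rest =>
    if PySem.Str.isIn needle (pvGetNorm item "event_name") = true ∨
       PySem.Str.isIn needle (pvGetNorm item "label") = true then some kpi_id
    else pvFindSubU needle rest

-- a nonempty needle is never a substring of the empty string
theorem pv_isIn_empty (needle : String) (h : needle ≠ "") : PySem.Str.isIn needle "" = false := by
  rw [Bool.eq_false_iff]
  intro hc
  rw [PySem.Str.isIn_iff_infix] at hc
  simp only [String.toList_empty, List.infix_nil] at hc
  exact h (String.toList_eq_nil_iff.mp hc)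

-- the first slot of the fold: the first exact hit
theorem pv_fold_fst (needle : String) (a b : Option String)
    (l : List (String × List (String × String))) :
    (l.foldl (pvScanStep needle) (a, b)).1 =
      match a with | some e => some e | none => pvFindExact needle l := by
  induction l generalizing a b with
  | nil => cases a <;> simp [pvFindExact]
  | cons hd tl ih =>
    obtain ⟨kid, item⟩ := hd
    cases a with
    | some e =>
      simp only [List.foldl_cons, pvScanStep]
      rw [ih]
      simp
    | none =>
      simp only [List.foldl_cons, pvScanStep, pvFindExact]
      by_cases hex : needle = pvGetNorm item "event_name" ∨ needle = pvGetNorm item "label" <;>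
        simp [hex, ih]

-- the second slot of the fold: the first (unguarded) substring hit
theorem pv_fold_snd (needle : String) (a b : Option String)
    (l : List (String × List (String × String))) :
    (l.foldl (pvScanStep needle) (a, b)).2 =
      match b with | some e => some e | none => pvFindSubU needle l := by
  induction l generalizing a b with
  | nil => cases b <;> simp [pvFindSubU]
  | cons hd tl ih =>
    obtain ⟨kid, item⟩ := hd
    cases b with
    | some e =>
      simp only [List.foldl_cons, pvScanStep]
      rw [ih]
      simp
    | none =>
      simp only [List.foldl_cons, pvScanStep, pvFindSubU]
      by_cases hs : PySem.Str.isIn needle (pvGetNorm item "event_name") = true ∨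
          PySem.Str.isIn needle (pvGetNorm item "label") = true <;>
        [skip; skip] <;> simp only [PySem.Str.isIn_eq] at hs <;> simp [hs, ih]

-- if no exact match exists, A's guarded second pass equals the unguarded substring find
theorem pv_sub_of_no_exact (needle : String) (h : needle ≠ "")
    (l : List (String × List (String × String))) (hne : pvFindExact needle l = none) :
    pvFindSub needle l = pvFindSubU needle l := by
  induction l with
  | nil => rfl
  | cons hd tl ih =>
    obtain ⟨kid, item⟩ := hd
    have hex : ¬ (needle = pvGetNorm item "event_name" ∨ needle = pvGetNorm item "label") := by
      intro hc
      simp [pvFindExact, hc] at hne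
    have htl : pvFindExact needle tl = none := by
      simpa [pvFindExact, hex] using hne
    have hnz : ∀ s : String, PySem.Str.isIn needle s = true → s ≠ "" := by
      intro s hs hs0
      rw [hs0, pv_isIn_empty needle h] at hs
      exact Bool.false_ne_true hs
    by_cases hs : PySem.Str.isIn needle (pvGetNorm item "event_name") = true ∨
        PySem.Str.isIn needle (pvGetNorm item "label") = true
    · have hg : needle ≠ "" ∧ ((pvGetNorm item "event_name" ≠ "" ∧
          PySem.Str.isIn needle (pvGetNorm item "event_name") = true) ∨
          (pvGetNorm item "label" ≠ "" ∧ PySem.Str.isIn needle (pvGetNorm item "label") = true)) := by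
        refine ⟨h, ?_⟩
        rcases hs with hc | hc
        · exact Or.inl ⟨hnz _ hc, hc⟩
        · exact Or.inr ⟨hnz _ hc, hc⟩
      simp only [PySem.Str.isIn_eq] at hs hg
      simp [pvFindSub, pvFindSubU, hex, hs, hg]
    · have hg : ¬ (needle ≠ "" ∧ ((pvGetNorm item "event_name" ≠ "" ∧
          PySem.Str.isIn needle (pvGetNorm item "event_name") = true) ∨
          (pvGetNorm item "label" ≠ "" ∧ PySem.Str.isIn needle (pvGetNorm item "label") = true))) := by
        rintro ⟨-, hc | hc⟩
        · exact hs (Or.inl hc.2)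
        · exact hs (Or.inr hc.2)
      simp only [pvFindSub, pvFindSubU, hex, if_false]
      rw [if_neg hg, if_neg hs]
      exact ih htl

-- the two membership tests agree
theorem pv_mem_eq (needle : String) (l : List (String × List (String × String))) :
    l.any (fun p => p.1 == needle) = (l.map Prod.fst).contains needle := by
  induction l with
  | nil => rfl
  | cons hd tl ih =>
    simp only [List.any_cons, List.map_cons, List.contains_cons, ih]
    by_cases hq : hd.1 = needle
    · simp [hq]
    · have hq' : ¬ needle = hd.1 := fun h => hq h.symm
      rw [beq_eq_false_iff_ne.2 hq, beq_eq_false_iff_ne.2 hq']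

-- ===== VERDICT =====
theorem resolve_kpi_for_conversion_py_spec : Claim_equal_resolve_kpi_for_conversion_py := by
  intro conversion_name kpi_by_id _
  unfold Spec_resolve_kpi_for_conversion_py resolve_kpi_for_conversion_py resolve_kpi_for_conversion_py_alt
  by_cases h0 : pvNormTok conversion_name = ""
  · simp [h0]
  · simp only [h0, if_false, ← pv_mem_eq]
    by_cases hk : kpi_by_id.any (fun p => p.1 == pvNormTok conversion_name)
    · simp [hk]
    · simp only [hk, Bool.false_eq_true, if_false]
      rw [pv_fold_fst, pv_fold_snd]
      cases hfe : pvFindExact (pvNormTok conversion_name) kpi_by_id with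
      | some r => simp
      | none => simpa using pv_sub_of_no_exact _ h0 kpi_by_id hfe
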